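-- pv_equiv track=rewrite | github.com/AP-MI-2021/lab-3-Luci01 | main.py | get_longest_prime_digits
-- ===== SOURCE A (Python) =====
-- def cifre_prime(nr):
--     '''
--     Functie care verifica daca numarul este format doar din cifre prime
--     :return: Bool, true daca numarul este format doar din cifre prime, false in caz contrar
--     '''
--     if nr == 0:
--         return False
--     while nr:
--         if nr % 10 == 1 or nr % 10 == 4 or nr % 10 == 6 or nr % 10 == 8 or nr % 10 == 9:
--             return False
--         nr = nr // 10
--     return True
--
-- def  get_longest_prime_digits(lst):
--     '''
--     Functie care determina cea mai lunga subsecventa in care toate numerele sunt formate din cifre prime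
--     :param lst:
--     :return: Cea mai lunga subsecventa in care toate numerele sunt formate din cifre prime
--     '''
--     lmax = 0
--     lactual = 0
--     secv_max = []
--     secv_act = []
--     for el in lst:
--         if (cifre_prime(el)):
--             lactual = lactual + 1
--             secv_act.append(el)
--         else:
--             if (lactual > lmax):
--                 lmax = lactual
--                 secv_max = secv_act
--             lactual = 0
--             secv_act = []
--     if (lactual > lmax):
--         lmax = lactual
--         secv_max = secv_act
--     return secv_max
-- ===== SOURCE B (Python) =====
-- def cifre_prime(nr):
--     '''Unchanged helper: True iff nr is made only of digits in {0,2,3,5,7} (per A), nr != 0.'''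
--     if nr == 0:
--         return False
--     while nr:
--         if nr % 10 == 1 or nr % 10 == 4 or nr % 10 == 6 or nr % 10 == 8 or nr % 10 == 9:
--             return False
--         nr = nr // 10
--     return True
--
-- def get_longest_prime_digits(lst):
--     '''Split the list into its maximal runs of prime-digit numbers, then pick the
--     first longest run with max(key=len) (max returns the first maximal element,
--     matching A's first-wins tie behaviour).'''
--     runs = [[]]
--     for el in lst:
--         if cifre_prime(el):
--             runs[-1].append(el)
--         elif runs[-1]:
--             runs.append([])
--     return max(runs, key=len)
-- ===== Notes on version B (the rewrite author's own statement) =====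
-- stated objective: simpler
-- what changed: Replaces A's four-variable best/current run bookkeeping with a split-into-maximal-runs pass followed by max(runs, key=len), whose first-maximal rule reproduces A's first-wins tie behaviour.
import Mathlib
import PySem

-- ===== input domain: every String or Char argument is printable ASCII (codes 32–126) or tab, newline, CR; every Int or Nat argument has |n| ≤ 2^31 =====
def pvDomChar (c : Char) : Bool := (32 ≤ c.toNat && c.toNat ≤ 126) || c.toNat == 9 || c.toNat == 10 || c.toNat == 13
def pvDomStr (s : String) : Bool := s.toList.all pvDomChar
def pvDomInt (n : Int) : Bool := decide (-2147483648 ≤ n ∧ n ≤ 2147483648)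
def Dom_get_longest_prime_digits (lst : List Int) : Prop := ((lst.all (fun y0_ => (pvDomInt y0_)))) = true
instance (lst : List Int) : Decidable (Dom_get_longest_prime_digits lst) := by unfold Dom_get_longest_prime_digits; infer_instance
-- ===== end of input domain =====

-- B rewrites A's run-tracking pass as "split into maximal runs, pick the first longest with max(key=len)"; objective: simpler.

-- ===== PORT A =====
-- termination helper for the while-loop of cifre_prime (cited by decreasing_by)
theorem cifre_prime_dec (nr : Int) (h0 : ¬ nr = 0)
    (h9 : ¬ (PySem.Int.mod nr 10 = 1 ∨ PySem.Int.mod nr 10 = 4 ∨ PySem.Int.mod nr 10 = 6 ∨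
             PySem.Int.mod nr 10 = 8 ∨ PySem.Int.mod nr 10 = 9)) :
    (PySem.Int.floordiv nr 10).natAbs < nr.natAbs := by
  have h := PySem.Int.floordiv_mul_add_mod nr 10
  have h1 := PySem.Int.mod_nonneg nr (b := 10) (by norm_num)
  have h2 := PySem.Int.mod_lt nr (b := 10) (by norm_num)
  omega

-- while nr: … ; return True  (shared by both ports: B keeps cifre_prime unchanged)
def cifre_prime_loop (nr : Int) : Bool :=
  if _h0 : nr = 0 then true
  else if _h9 : PySem.Int.mod nr 10 = 1 ∨ PySem.Int.mod nr 10 = 4 ∨ PySem.Int.mod nr 10 = 6 ∨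
               PySem.Int.mod nr 10 = 8 ∨ PySem.Int.mod nr 10 = 9 then false
  else cifre_prime_loop (PySem.Int.floordiv nr 10)
termination_by nr.natAbs
decreasing_by exact cifre_prime_dec nr _h0 _h9

def cifre_prime (nr : Int) : Bool :=
  if nr = 0 then false else cifre_prime_loop nr

-- the body of A's for-loop, state (lmax, lactual, secv_max, secv_act)
def pyStepA (st : Int × Int × List Int × List Int) (el : Int) : Int × Int × List Int × List Int :=
  if cifre_prime el then (st.1, st.2.1 + 1, st.2.2.1, st.2.2.2 ++ [el])
  else if st.2.1 > st.1 then (st.2.1, 0, st.2.2.2, [])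
  else (st.1, 0, st.2.2.1, [])

def get_longest_prime_digits (lst : List Int) : List Int :=
  let s := lst.foldl pyStepA (0, 0, ([] : List Int), ([] : List Int))
  if s.2.1 > s.1 then s.2.2.2 else s.2.2.1

-- ===== PORT B =====
-- the body of B's for-loop: runs[-1].append(el) / runs.append([]) on a list of runs
def pyStepB (runs : List (List Int)) (el : Int) : List (List Int) :=
  if cifre_prime el then runs.dropLast ++ [runs.getLastD [] ++ [el]]
  else if runs.getLastD [] ≠ [] then runs ++ [[]]
  else runs

def get_longest_prime_digits_alt (lst : List Int) : List Int :=
  let runs := lst.foldl pyStepB [[]]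
  -- max(runs, key=len): runs is nonempty by construction, so Python's max never raises
  (PySem.List.max? runs (fun r => r.length)).getD []

-- ===== PRECONDITION & SPEC =====
def Spec_get_longest_prime_digits (lst : List Int) (out : List Int) : Prop := out = get_longest_prime_digits_alt lst
instance (lst : List Int) (out : List Int) : Decidable (Spec_get_longest_prime_digits lst out) := by unfold Spec_get_longest_prime_digits; infer_instance

-- ===== CLAIM (what is proved, stated in full; the proofs are below) =====
def Claim_equal_get_longest_prime_digits : Prop := ∀ (lst : List Int), Dom_get_longest_prime_digits lst → Spec_get_longest_prime_digits lst (get_longest_prime_digits lst)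

-- ===== LEMMAS AND PROOFS =====

-- "keep the later run only if strictly longer" (first-wins selection step)
def pick (b r : List Int) : List Int := if b.length < r.length then r else b

theorem pick_nil (r : List Int) : pick [] r = r := by
  cases r <;> simp [pick]

-- the runs B builds, as a structural recursion on the input with the current run as accumulator
def runsRec : List Int → List Int → List (List Int)
  | [], c => [c]
  | el :: xs, c =>
      if cifre_prime el then runsRec xs (c ++ [el])
      else if c ≠ [] then c :: runsRec xs []
      else runsRec xs []

theorem runsRec_ne_nil (xs : List Int) (c : List Int) : runsRec xs c ≠ [] := by
  induction xs generalizing c with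
  | nil => simp [runsRec]
  | cons el xs ih =>
      simp only [runsRec]
      split_ifs <;> simp [ih]

-- B's fold touches only the last run: factor out the finished runs
theorem foldB_factor (xs : List Int) (rs : List (List Int)) (c : List Int) :
    xs.foldl pyStepB (rs ++ [c]) = rs ++ runsRec xs c := by
  induction xs generalizing rs c with
  | nil => simp [runsRec]
  | cons el xs ih =>
      simp only [List.foldl_cons, runsRec, pyStepB, List.getLastD_concat, List.dropLast_concat]
      split_ifs with h1 h2
      · exact ih rs (c ++ [el])
      · have : (rs ++ [c]) ++ [[]] = (rs ++ [c]) ++ [([] : List Int)] := rfl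
        rw [List.append_assoc] at *
        have := ih (rs ++ [c]) []
        simpa [List.append_assoc] using this
      · exact ih rs c |>.trans (by simp_all)

-- first-extremal max over a nonempty list is the pick-fold from its head
theorem max?_cons_pick (t : List (List Int)) (r0 : List Int) :
    PySem.List.max? (r0 :: t) (fun r => r.length) = some (t.foldl pick r0) := by
  simp only [PySem.List.max?, List.foldl_cons]
  induction t generalizing r0 with
  | nil => rfl
  | cons r t ih =>
      simp only [List.foldl_cons, pick]
      split_ifs with h <;> simp_all

-- A's whole computation (loop + final compare), run from a canonical state, equals the pick-fold over B's runs
theorem main_inv (xs : List Int) (best cur : List Int) :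
    (let s := xs.foldl pyStepA ((best.length : Int), (cur.length : Int), best, cur)
     if s.2.1 > s.1 then s.2.2.2 else s.2.2.1) = (runsRec xs cur).foldl pick best := by
  induction xs generalizing best cur with
  | nil =>
      simp only [List.foldl_nil, runsRec, List.foldl_cons, List.foldl_nil, pick]
      split_ifs with h h' h' <;> first | rfl | omega
  | cons el xs ih =>
      simp only [List.foldl_cons, pyStepA, runsRec]
      by_cases hp : cifre_prime el
      · simp only [hp, if_pos]
        have : ((cur.length : Int) + 1) = (((cur ++ [el]).length : Int)) := by simp
        rw [this]
        exact ih best (cur ++ [el])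
      · simp only [hp, Bool.false_eq_true, if_false]
        by_cases hlt : ((cur.length : Int)) > ((best.length : Int))
        · have hcne : cur ≠ [] := by
            intro h; subst h; simp at hlt; omega
          simp only [hlt, if_pos, hcne, ne_eq, not_false_iff, List.foldl_cons]
          have hpick : pick best cur = cur := by simp [pick]; omega
          rw [hpick]
          have h0 : ((0 : Int)) = (((List.nil : List Int).length : Int)) := by simp
          have := ih cur []
          simpa using this
        · simp only [hlt, if_false]
          by_cases hc : cur = []
          · subst hc
            rw [if_neg (show ¬(([] : List Int) ≠ []) from fun h => h rfl)]
            have := ih best []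
            simpa using this
          · simp only [hc, ne_eq, not_false_iff, if_true, List.foldl_cons]
            have hpick : pick best cur = best := by simp [pick]; omega
            rw [hpick]
            have := ih best []
            simpa using this

-- ===== VERDICT (by name: the statement is the Claim_ definition above) =====
theorem get_longest_prime_digits_spec : Claim_equal_get_longest_prime_digits := by
  intro lst _
  unfold Spec_get_longest_prime_digits
  unfold get_longest_prime_digits get_longest_prime_digits_alt
  have hfold : lst.foldl pyStepB [[]] = runsRec lst [] := by
    have := foldB_factor lst [] []
    simpa using this
  rw [hfold]
  obtain ⟨r0, t, hrt⟩ : ∃ r0 t, runsRec lst [] = r0 :: t := by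
    cases h : runsRec lst [] with
    | nil => exact absurd h (runsRec_ne_nil lst [])
    | cons r0 t => exact ⟨r0, t, rfl⟩
  rw [hrt]
  show _ = (PySem.List.max? (r0 :: t) fun r => r.length).getD []
  rw [max?_cons_pick, Option.getD_some]
  have hmain := main_inv lst [] []
  rw [hrt] at hmain
  simpa [pick_nil] using hmain
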